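-- pv_equiv track=rewrite | github.com/davidmzeng/beat-the-landlord | beat_the_landlord.py | is_sequence_of_triplets_with_singles
-- ===== SOURCE A (Python) =====
-- RANK_ORDER = ("3", "4", "5", "6", "7", "8", "9", "10", "J", "Q", "K", "A", "2", "B", "R")
--
-- def sorted_cards(cards):
--     """
--     Takes cards as an argument and returns a new group of sorted cards
--     """
--     for card in cards: # check for invalid cards
--         if card not in RANK_ORDER:
--             raise ValueError("invalid card found")
--     sorted_result = []
--     for rank in RANK_ORDER: # iterate in sorted order
--         for card in cards:
--             if card == rank:
--                 sorted_result.append(card)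
--     return sorted_result
--
-- def get_rank(card):
--     """
--     Takes a card as an argument and returns a value representing its relative
--     rank compared with other cards
--     """
--     if card not in RANK_ORDER: # check that card isn't invalid
--         raise ValueError("invalid card")
--     return RANK_ORDER.index(card)
--
-- def is_sequence_of_triplets_with_singles(combo):
--     """
--     Takes a combo as an argument and returns True if it is a "sequence of triplets with singles" combo type,
--     returns False otherwise
--     """
--     for card in combo: # check for invalid cards
--         if card not in RANK_ORDER:
--             return False
--     rank_counts = {}
--     for card in combo: # put combo into a dictionary representing frequency of each card
--         if card not in rank_counts:
--             rank_counts[card] = 1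
--         else:
--             rank_counts[card] += 1
--     for card in combo:
--         if rank_counts[card] != 3 and rank_counts[card] != 1: # check that we have only triplets and singles
--             return False
--     triplets_ranks = []
--     singles_ranks = []
--     for rank in rank_counts: # get ranks of triplets and ranks of singles
--         if rank_counts[rank] == 3:
--             triplets_ranks.append(rank)
--         elif rank_counts[rank] == 1:
--             singles_ranks.append(rank)
--     if len(triplets_ranks) != len(singles_ranks): # number of triplets must match number of singles
--         return False
--     if "2" in triplets_ranks: # check for invalid cards in triplets
--         return False
--     if "B" in singles_ranks and "R" in singles_ranks: # check for invalid singles - both Jokers cannot be used in combo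
--         return False
--     if len(triplets_ranks) < 2: # check for at least 2 triplets
--         return False
--     sorted_triplets_ranks = sorted_cards(triplets_ranks)
--     for i in range(len(sorted_triplets_ranks) - 1): # check triplets are consecutive
--         if get_rank(sorted_triplets_ranks[i]) != get_rank(sorted_triplets_ranks[i + 1]) - 1:
--             return False
--     return True
-- ===== SOURCE B (Python) =====
-- RANK_ORDER = ("3", "4", "5", "6", "7", "8", "9", "10", "J", "Q", "K", "A", "2", "B", "R")
--
-- def is_sequence_of_triplets_with_singles(combo):
--     """Counting-sort style: build the fixed 15-slot frequency table over
--     RANK_ORDER (invalid cards detected because they never get counted, so the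
--     table totals less than len(combo)), then one state-machine scan over the
--     table collects triple/single tallies and the first/last triple slot, and
--     the verdict is pure arithmetic on that state (contiguity = span check)."""
--     counts = [combo.count(r) for r in RANK_ORDER]
--     if sum(counts) != len(combo):
--         return False  # some card is not a rank
--     triples = 0
--     singles = 0
--     first3 = -1
--     last3 = -1
--     for i, c in enumerate(counts):
--         if c == 3:
--             triples += 1
--             if first3 < 0:
--                 first3 = i
--             last3 = i
--         elif c == 1:
--             singles += 1
--         elif c != 0:
--             return False
--     return (triples == singles
--             and triples >= 2
--             and counts[12] != 3
--             and not (counts[13] == 1 and counts[14] == 1)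
--             and last3 - first3 == triples - 1)
-- ===== Notes on version B (the rewrite author's own statement) =====
-- stated objective: alternative
-- what changed: B replaces A's dict-counting + triplet/single list splitting + selection sort over RANK_ORDER + adjacent-pair scan by a counting-sort-style pipeline: a fixed 15-slot frequency table (whose total exposes invalid cards), one state-machine scan over the table accumulating triple/single tallies and the first/last triple slot, and a final arithmetic span check for contiguity.
import Mathlib
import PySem

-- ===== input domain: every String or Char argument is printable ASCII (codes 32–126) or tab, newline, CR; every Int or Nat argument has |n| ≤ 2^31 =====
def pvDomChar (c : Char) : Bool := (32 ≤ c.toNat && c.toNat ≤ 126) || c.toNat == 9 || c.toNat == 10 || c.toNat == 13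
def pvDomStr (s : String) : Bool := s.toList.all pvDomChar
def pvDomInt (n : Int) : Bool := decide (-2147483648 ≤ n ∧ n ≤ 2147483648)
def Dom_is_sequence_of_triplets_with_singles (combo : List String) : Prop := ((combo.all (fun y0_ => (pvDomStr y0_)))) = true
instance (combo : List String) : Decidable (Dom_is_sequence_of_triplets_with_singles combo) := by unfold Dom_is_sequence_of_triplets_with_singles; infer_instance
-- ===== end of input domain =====

-- B replaces A's dict counting, triplet/single list splitting, selection sort and adjacent-pair
-- scan by a fixed 15-slot frequency table (its total exposes invalid cards), one state-machine
-- scan over the table, and an arithmetic span check for contiguity (alternative algorithm).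

-- ===== PORT A =====
def pvRANK : List String := ["3", "4", "5", "6", "7", "8", "9", "10", "J", "Q", "K", "A", "2", "B", "R"]

-- sorted_cards: 'none' = the ValueError raise on an invalid card
def pvSortedCards (cards : List String) : Option (List String) :=
  if cards.all (fun c => pvRANK.contains c) then
    some (pvRANK.foldl (fun acc rank =>
      cards.foldl (fun acc2 card => if card == rank then acc2 ++ [card] else acc2) acc) [])
  else none

-- get_rank: 'none' = the ValueError raise ('card not in RANK_ORDER' is exactly index? = none)
def pvGetRank (card : String) : Option Int :=
  (PySem.List.index? pvRANK card).map (fun n => (n : Int))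

def is_sequence_of_triplets_with_singles (combo : List String) : Bool :=
  if combo.any (fun card => !(pvRANK.contains card)) then false
  else
    let rank_counts := combo.foldl (fun d card =>
      if d.contains card then d.insert card (d.getD card 0 + 1) else d.insert card 1)
      (PySem.Dict.empty : PySem.Dict String Int)
    -- rank_counts[card] ported as getD _ 0: card is always a key here (it was just counted)
    if combo.any (fun card => rank_counts.getD card 0 != 3 && rank_counts.getD card 0 != 1) then false
    else
      let ts := rank_counts.keys.foldl (fun (acc : List String × List String) rank =>
        if rank_counts.getD rank 0 == 3 then (acc.1 ++ [rank], acc.2)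
        else if rank_counts.getD rank 0 == 1 then (acc.1, acc.2 ++ [rank])
        else acc) ([], [])
      if ts.1.length != ts.2.length then false
      else if ts.1.contains "2" then false
      else if ts.2.contains "B" && ts.2.contains "R" then false
      else if ts.1.length < 2 then false
      else match pvSortedCards ts.1 with
        | none => false  -- unreachable (triplet ranks are valid cards); a raise would escape here
        | some st =>
          (PySem.List.pyRange 0 ((st.length : Int) - 1) 1).all (fun i =>
            match PySem.List.pyGet? st i, PySem.List.pyGet? st (i + 1) with
            | some c1, some c2 =>
              match pvGetRank c1, pvGetRank c2 with
              | some r1, some r2 => r1 == r2 - 1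
              | _, _ => false  -- unreachable raise
            | _, _ => false)   -- unreachable IndexError

-- ===== PORT B =====
def pvRANKalt : List String := ["3", "4", "5", "6", "7", "8", "9", "10", "J", "Q", "K", "A", "2", "B", "R"]

-- the for-loop over enumerate(counts); 'none' = the early 'return False' on a count not in {0,1,3}
def pvScan : List (Int × Int) → Int → Int → Int → Int → Option (Int × Int × Int × Int)
  | [], triples, singles, first3, last3 => some (triples, singles, first3, last3)
  | (i, c) :: rest, triples, singles, first3, last3 =>
    if c == 3 then pvScan rest (triples + 1) singles (if first3 < 0 then i else first3) i
    else if c == 1 then pvScan rest triples (singles + 1) first3 last3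
    else if c != 0 then none
    else pvScan rest triples singles first3 last3

def is_sequence_of_triplets_with_singles_alt (combo : List String) : Bool :=
  let counts := pvRANKalt.map (fun r => (PySem.List.count combo r : Int))
  if counts.sum != PySem.List.len combo then false
  else
    match pvScan (PySem.List.enumerate counts 0) 0 0 (-1) (-1) with
    | none => false
    | some (triples, singles, first3, last3) =>
      -- the three table reads counts[12], counts[13], counts[14]; 'none' (IndexError) is unreachable
      match PySem.List.pyGet? counts 12 with
      | none => false
      | some c2 =>
        match PySem.List.pyGet? counts 13 with
        | none => false
        | some cB =>
          match PySem.List.pyGet? counts 14 with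
          | none => false
          | some cR =>
            triples == singles && decide (2 ≤ triples) && c2 != 3 && !(cB == 1 && cR == 1) &&
              last3 - first3 == triples - 1

-- ===== PRECONDITION & SPEC =====
def Spec_is_sequence_of_triplets_with_singles (combo : List String) (out : Bool) : Prop := out = is_sequence_of_triplets_with_singles_alt combo
instance (combo : List String) (out : Bool) : Decidable (Spec_is_sequence_of_triplets_with_singles combo out) := by unfold Spec_is_sequence_of_triplets_with_singles; infer_instance

-- ===== CLAIM (what is proved, stated in full; the proofs are below) =====
def Claim_equal_is_sequence_of_triplets_with_singles : Prop := ∀ (combo : List String), Dom_is_sequence_of_triplets_with_singles combo → Spec_is_sequence_of_triplets_with_singles combo (is_sequence_of_triplets_with_singles combo)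

-- ===== LEMMAS AND PROOFS =====

theorem stepA_eq :
    (fun (d : PySem.Dict String Int) card =>
      if d.contains card then d.insert card (d.getD card 0 + 1) else d.insert card 1)
    = (fun (d : PySem.Dict String Int) card => d.insert card (d.getD card 0 + 1)) := by
  funext d card
  by_cases h : d.contains card
  · simp [h]
  · simp [h, PySem.Dict.getD_of_not_contains d 0 (by simpa using h)]

theorem filter_beq_of_nodup (cards : List String) (hn : cards.Nodup) (rank : String) :
    cards.filter (fun c => c == rank) = if cards.contains rank then [rank] else [] := by
  induction cards with
  | nil => simp
  | cons c rest ih =>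
    rcases List.nodup_cons.mp hn with ⟨hc, hrest⟩
    by_cases h : c = rank
    · subst h
      have : rest.filter (fun x => x == c) = [] :=
        List.filter_eq_nil_iff.mpr (fun x hx => by simp; rintro rfl; exact hc hx)
      simp [this]
    · have hb : (c == rank) = false := by simpa using h
      simp only [List.filter_cons, hb, Bool.false_eq_true, if_false, ih hrest]
      by_cases hm : rank ∈ rest <;> simp [hm, show ¬ rank = c from fun h' => h h'.symm]

theorem sortedCards_eq (cards : List String) (hn : cards.Nodup)
    (hv : cards.all (fun c => pvRANK.contains c) = true) :
    pvSortedCards cards = some (pvRANK.filter (fun r => cards.contains r)) := by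
  unfold pvSortedCards
  rw [if_pos hv]
  congr 1
  have hinner : ∀ (acc : List String) (rank : String),
      cards.foldl (fun acc2 card => if card == rank then acc2 ++ [card] else acc2) acc
        = acc ++ (if cards.contains rank then [rank] else []) := by
    intro acc rank
    have := PySem.List.foldl_append_if (fun c => c == rank) (fun c => c) cards acc
    simp only [this, List.map_id', filter_beq_of_nodup cards hn rank]
  calc pvRANK.foldl (fun acc rank =>
          cards.foldl (fun acc2 card => if card == rank then acc2 ++ [card] else acc2) acc) []
      = pvRANK.foldl (fun acc rank => if cards.contains rank then acc ++ [rank] else acc) [] := by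
        apply PySem.List.foldl_congr_mem
        intro acc rank _
        rw [hinner]
        by_cases h : rank ∈ cards <;> simp [h]
    _ = pvRANK.filter (fun r => cards.contains r) := by
        have := PySem.List.foldl_append_if (fun r => cards.contains r) (fun r => r) pvRANK []
        simpa using this

theorem foldl_split (d : PySem.Dict String Int) (ks : List String) :
    ∀ (t s : List String),
    ks.foldl (fun acc rank =>
        if d.getD rank 0 == 3 then (acc.1 ++ [rank], acc.2)
        else if d.getD rank 0 == 1 then (acc.1, acc.2 ++ [rank])
        else acc) (t, s)
      = (t ++ ks.filter (fun r => d.getD r 0 == 3), s ++ ks.filter (fun r => d.getD r 0 == 1)) := by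
  induction ks with
  | nil => simp
  | cons r rest ih =>
    intro t s
    rw [List.foldl_cons]
    by_cases h3 : (d.getD r 0 == 3) = true
    · have h1 : (d.getD r 0 == 1) = false := by
        rw [beq_iff_eq] at h3; simp [h3]
      rw [if_pos h3, ih]
      simp [h3, h1]
    · by_cases h1 : (d.getD r 0 == 1) = true
      · rw [if_neg (by simp [h3]), if_pos h1, ih]
        simp [h3, h1]
      · rw [if_neg (by simp [h3]), if_neg (by simp [h1]), ih]
        simp [h3, h1]

theorem getRank_enum : ∀ p ∈ PySem.List.enumerate pvRANK 0, pvGetRank p.2 = some p.1 := by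
  have h : (PySem.List.enumerate pvRANK 0).all (fun p => pvGetRank p.2 == some p.1) = true := by
    decide
  intro p hp
  have := List.all_eq_true.mp h p hp
  simpa using this

theorem last_ge : ∀ (t : List Int) (a : Int), List.Pairwise (· < ·) (a :: t) →
    a + t.length ≤ (a :: t).getLast (List.cons_ne_nil a t) := by
  intro t
  induction t with
  | nil => intro a _; simp
  | cons b t' ih =>
    intro a hp
    have hab : a < b := (List.pairwise_cons.mp hp).1 b (by simp)
    have hp' := (List.pairwise_cons.mp hp).2
    have h2 := ih b hp'
    rw [List.getLast_cons (List.cons_ne_nil b t')]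
    simp only [List.length_cons]
    push_cast
    omega

theorem chain_iff_last : ∀ (t : List Int) (a : Int), List.Pairwise (· < ·) (a :: t) →
    (List.IsChain (fun x y => y = x + 1) (a :: t) ↔
      (a :: t).getLast (List.cons_ne_nil a t) = a + t.length) := by
  intro t
  induction t with
  | nil => intro a _; simp
  | cons b t' ih =>
    intro a hp
    have hab : a < b := (List.pairwise_cons.mp hp).1 b (by simp)
    have hp' := (List.pairwise_cons.mp hp).2
    have hge := last_ge t' b hp'
    rw [List.isChain_cons_cons, List.getLast_cons (List.cons_ne_nil b t'), ih b hp']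
    set L := (b :: t').getLast (List.cons_ne_nil b t') with hL
    simp only [List.length_cons]
    push_cast
    constructor
    · rintro ⟨h1, h2⟩; omega
    · intro h
      by_cases hb : b = a + 1
      · constructor
        · exact hb
        · omega
      · exfalso; omega

theorem final_eq (q : String → Bool)
    (hne : ((PySem.List.enumerate pvRANK 0).filter (fun p => q p.2)) ≠ []) :
    ((PySem.List.pyRange 0 (((pvRANK.filter q).length : Int) - 1) 1).all (fun i =>
      match PySem.List.pyGet? (pvRANK.filter q) i, PySem.List.pyGet? (pvRANK.filter q) (i + 1) with
      | some c1, some c2 =>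
        match pvGetRank c1, pvGetRank c2 with
        | some r1, some r2 => r1 == r2 - 1
        | _, _ => false
      | _, _ => false))
    = (match PySem.List.pyGet? (((PySem.List.enumerate pvRANK 0).filter (fun p => q p.2)).map (·.1)) (-1) with
      | some last =>
        match PySem.List.pyGet? (((PySem.List.enumerate pvRANK 0).filter (fun p => q p.2)).map (·.1)) 0 with
        | some first =>
          last - first == ((((PySem.List.enumerate pvRANK 0).filter (fun p => q p.2)).map (·.1)).length : Int) - 1
        | none => false
      | none => false) := by
  set l := (PySem.List.enumerate pvRANK 0).filter (fun p => q p.2) with hl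
  have hst : pvRANK.filter q = l.map (·.2) := by
    conv_lhs => rw [← PySem.List.map_snd_enumerate pvRANK 0]
    rw [List.filter_map]
    rfl
  have hmem : ∀ p ∈ l, p ∈ PySem.List.enumerate pvRANK 0 := fun p hp => List.mem_of_mem_filter hp
  have hpw : (l.map (·.1)).Pairwise (· < ·) := by
    apply List.pairwise_map.mpr
    exact List.Pairwise.sublist List.filter_sublist (PySem.List.pairwise_lt_enumerate pvRANK 0)
  have hlen : (pvRANK.filter q).length = (l.map (·.1)).length := by
    rw [hst, List.length_map, List.length_map]
  have key : ∀ (j : ℕ) (hj : j < l.length),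
      pvGetRank ((pvRANK.filter q)[j]'(by rw [hst, List.length_map]; exact hj))
        = some ((l.map (·.1))[j]'(by rw [List.length_map]; exact hj)) := by
    intro j hj
    have h1 : (pvRANK.filter q)[j]'(by rw [hst, List.length_map]; exact hj) = (l[j]'hj).2 := by
      simp [hst]
    have h2 : (l.map (·.1))[j]'(by rw [List.length_map]; exact hj) = (l[j]'hj).1 := by
      simp
    rw [h1, h2]
    exact getRank_enum _ (hmem _ (l.getElem_mem hj))
  have hA : ((PySem.List.pyRange 0 (((pvRANK.filter q).length : Int) - 1) 1).all (fun i =>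
      match PySem.List.pyGet? (pvRANK.filter q) i, PySem.List.pyGet? (pvRANK.filter q) (i + 1) with
      | some c1, some c2 =>
        match pvGetRank c1, pvGetRank c2 with
        | some r1, some r2 => r1 == r2 - 1
        | _, _ => false
      | _, _ => false) = true)
      ↔ List.IsChain (fun x y => y = x + 1) (l.map (·.1)) := by
    rw [List.all_eq_true, List.isChain_iff_getElem]
    constructor
    · intro H j hj
      rw [List.length_map] at hj
      have hjm : (j : Int) ∈ PySem.List.pyRange 0 (((pvRANK.filter q).length : Int) - 1) 1 := by
        rw [PySem.List.mem_pyRange_one]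
        constructor
        · positivity
        · rw [hlen, List.length_map]; omega
      have hb := H _ hjm
      have e1 : PySem.List.pyGet? (pvRANK.filter q) (j : Int)
          = some ((pvRANK.filter q)[j]'(by rw [hst, List.length_map]; omega)) := by
        rw [PySem.List.pyGet?_natCast, List.getElem?_eq_getElem]
      have e2 : PySem.List.pyGet? (pvRANK.filter q) ((j : Int) + 1)
          = some ((pvRANK.filter q)[j+1]'(by rw [hst, List.length_map]; omega)) := by
        rw [show ((j : Int) + 1) = ((j + 1 : ℕ) : Int) by push_cast; ring,
          PySem.List.pyGet?_natCast, List.getElem?_eq_getElem]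
      rw [e1, e2] at hb
      simp only [key j (by omega), key (j+1) (by omega), beq_iff_eq] at hb
      omega
    · intro H i hi
      rw [PySem.List.mem_pyRange_one] at hi
      obtain ⟨hi0, hi1⟩ := hi
      set j := i.toNat with hj
      have hij : (j : Int) = i := Int.toNat_of_nonneg hi0
      have hjlt : j + 1 < l.length := by
        rw [hlen, List.length_map] at hi1; omega
      have e1 : PySem.List.pyGet? (pvRANK.filter q) i
          = some ((pvRANK.filter q)[j]'(by rw [hst, List.length_map]; omega)) := by
        rw [PySem.List.pyGet?_of_nonneg _ hi0, List.getElem?_eq_getElem]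
      have e2 : PySem.List.pyGet? (pvRANK.filter q) (i + 1)
          = some ((pvRANK.filter q)[j+1]'(by rw [hst, List.length_map]; omega)) := by
        rw [PySem.List.pyGet?_of_nonneg _ (by omega),
          show (i + 1).toNat = j + 1 by omega, List.getElem?_eq_getElem]
      rw [e1, e2]
      have := H j (by rw [List.length_map]; omega)
      simp only [key j (by omega), key (j+1) (by omega), beq_iff_eq]
      omega
  have hlne : l.map (·.1) ≠ [] := by simpa using hne
  rcases hml : l.map (·.1) with _ | ⟨a, t⟩
  · exact absurd hml hlne
  · rw [hml] at hA hpw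
    rw [Bool.eq_iff_iff, hA, PySem.List.pyGet?_neg_one, PySem.List.pyGet?_zero, hml]
    rw [List.getLast?_eq_some_getLast (List.cons_ne_nil a t), List.getElem?_eq_getElem (by simp)]
    rw [chain_iff_last t a hpw]
    set L := (a :: t).getLast (List.cons_ne_nil a t) with hLdef
    simp only [List.getElem_cons_zero, List.length_cons, beq_iff_eq]
    push_cast
    omega

-- B-side: the frequency-table total counts exactly the valid cards
theorem sum_counts (R : List String) (hR : R.Nodup) :
    ∀ (l : List String),
    (R.map (fun r => ((List.count r l : Nat) : Int))).sum
      = (((l.filter (fun c => R.contains c)).length : Nat) : Int) := by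
  intro l
  induction l with
  | nil => simp
  | cons c t ih =>
    have h1 : (R.map (fun r => ((List.count r (c :: t) : Nat) : Int))).sum
        = (R.map (fun r => ((List.count r t : Nat) : Int))).sum
          + (R.map (fun r => if (c == r) then (1 : Int) else 0)).sum := by
      rw [← PySem.List.sum_map_add_int]
      congr 1
      apply List.map_congr_left
      intro r _
      rw [List.count_cons]
      push_cast
      split_ifs <;> simp
    have h2 : (R.map (fun r => if (c == r) then (1 : Int) else 0)).sum
        = ((R.countP (fun r => c == r) : Nat) : Int) := PySem.List.sum_map_ite_one_zero _ R
    have h3 : R.countP (fun r => c == r) = if c ∈ R then 1 else 0 := by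
      have : R.countP (fun r => c == r) = R.count c := by
        rw [List.count]
        apply List.countP_congr
        intro r _
        constructor <;> intro h <;> simp_all
      rw [this]
      by_cases h : c ∈ R
      · simp [h, List.count_eq_one_of_mem hR h]
      · simp [h, List.count_eq_zero_of_not_mem h]
    rw [h1, ih, h2, h3, List.filter_cons]
    by_cases h : c ∈ R
    · simp [h]
    · simp [h]

-- B-side: enumerate over a mapped list
theorem enum_map {α β : Type} (g : α → β) : ∀ (xs : List α) (s : Int),
    PySem.List.enumerate (xs.map g) s = (PySem.List.enumerate xs s).map (fun p => (p.1, g p.2)) := by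
  intro xs
  induction xs with
  | nil => intro s; simp [PySem.List.enumerate_nil]
  | cons x t ih => intro s; simp [PySem.List.enumerate_cons, ih]

theorem enum_nonneg {α : Type} (xs : List α) : ∀ p ∈ PySem.List.enumerate xs 0, 0 ≤ p.1 := by
  intro p hp
  rw [PySem.List.mem_enumerate_iff] at hp
  obtain ⟨k, hk, hpk⟩ := hp
  subst hpk
  simp

-- B-side: what the state-machine scan computes
theorem scan_char : ∀ (l : List (Int × Int)) (t s f ls : Int),
    (∀ p ∈ l, 0 ≤ p.1) →
    pvScan l t s f ls =
      if l.all (fun p => p.2 == 3 || p.2 == 1 || p.2 == 0) then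
        some (t + ((l.filter (fun p => p.2 == 3)).length : Int),
              s + ((l.filter (fun p => p.2 == 1)).length : Int),
              (if f < 0 then ((l.filter (fun p => p.2 == 3)).map (·.1)).headD f else f),
              ((l.filter (fun p => p.2 == 3)).map (·.1)).getLastD ls)
      else none := by
  intro l
  induction l with
  | nil => intro t s f ls _; simp [pvScan]
  | cons p rest ih =>
    obtain ⟨i, c⟩ := p
    intro t s f ls hpos
    have hi : (0 : Int) ≤ i := hpos (i, c) (by simp)
    have hrest : ∀ q ∈ rest, (0 : Int) ≤ q.1 := fun q hq => hpos q (by simp [hq])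
    by_cases h3 : c = 3
    · subst h3
      rw [show pvScan ((i, 3) :: rest) t s f ls
          = pvScan rest (t + 1) s (if f < 0 then i else f) i from by simp [pvScan]]
      rw [ih (t + 1) s (if f < 0 then i else f) i hrest]
      simp only [List.all_cons, List.filter_cons, show ((3:Int) == 3) = true from rfl,
        show ((3:Int) == 1) = false from rfl, show ((3:Int) == 0) = false from rfl,
        Bool.true_or, Bool.true_and, Bool.false_eq_true, if_true, if_false, List.map_cons]
      by_cases hall : rest.all (fun p => p.2 == 3 || p.2 == 1 || p.2 == 0) = true
      · rw [if_pos hall, if_pos hall]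
        refine congrArg some ?_
        simp only [Prod.mk.injEq, List.length_cons, List.headD_cons, List.getLastD_cons]
        refine ⟨by push_cast; ring, trivial, ?_, trivial⟩
        by_cases hf : f < 0
        · rw [if_pos hf, if_neg (by omega)]
        · rw [if_neg hf, if_neg hf]
      · rw [if_neg hall, if_neg hall]
    · by_cases h1 : c = 1
      · subst h1
        rw [show pvScan ((i, 1) :: rest) t s f ls = pvScan rest t (s + 1) f ls from by
          simp [pvScan]]
        rw [ih t (s + 1) f ls hrest]
        simp only [List.all_cons, List.filter_cons, show ((1:Int) == 3) = false from rfl,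
          show ((1:Int) == 1) = true from rfl, Bool.false_or, Bool.true_or, Bool.true_and,
          Bool.false_eq_true, if_true, if_false]
        by_cases hall : rest.all (fun p => p.2 == 3 || p.2 == 1 || p.2 == 0) = true
        · rw [if_pos hall, if_pos hall]
          refine congrArg some ?_
          simp only [Prod.mk.injEq, List.length_cons]
          exact ⟨trivial, by push_cast; ring, trivial⟩
        · rw [if_neg hall, if_neg hall]
      · by_cases h0 : c = 0
        · subst h0
          rw [show pvScan ((i, 0) :: rest) t s f ls = pvScan rest t s f ls from by
            simp [pvScan]]
          rw [ih t s f ls hrest]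
          simp only [List.all_cons, List.filter_cons, show ((0:Int) == 3) = false from rfl,
            show ((0:Int) == 1) = false from rfl, show ((0:Int) == 0) = true from rfl,
            Bool.false_or, Bool.or_true, Bool.true_and, Bool.false_eq_true, if_false]
        · rw [show pvScan ((i, c) :: rest) t s f ls = none from by simp [pvScan, h3, h1, h0]]
          rw [if_neg (by simp [h3, h1, h0])]

-- ===== VERDICT (by name: the statement is the Claim_ definition above) =====
theorem is_sequence_of_triplets_with_singles_spec : Claim_equal_is_sequence_of_triplets_with_singles := by
  intro combo _
  show is_sequence_of_triplets_with_singles combo = is_sequence_of_triplets_with_singles_alt combo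
  unfold is_sequence_of_triplets_with_singles is_sequence_of_triplets_with_singles_alt
  simp only [show pvRANKalt = pvRANK from rfl, PySem.List.count_eq, PySem.List.len_eq]
  by_cases hval : combo.any (fun card => !(pvRANK.contains card)) = true
  · -- some invalid card: A returns False at the first loop, B's table total is short
    rw [if_pos hval]
    obtain ⟨c, hc, hcv⟩ := List.any_eq_true.mp hval
    have hlt : (combo.filter (fun c => pvRANK.contains c)).length < combo.length :=
      List.length_filter_lt_length_iff_exists.mpr ⟨c, hc, by simpa using hcv⟩
    rw [if_pos (by
      rw [sum_counts pvRANK (by decide) combo]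
      simpa using (by omega : ¬ ((combo.filter (fun c => pvRANK.contains c)).length : Int) = (combo.length : Int)))]
  · -- all cards valid
    rw [Bool.not_eq_true] at hval
    rw [if_neg (by rw [hval]; exact Bool.false_ne_true)]
    have hvalid : ∀ c ∈ combo, pvRANK.contains c = true := by
      intro c hc
      have := List.any_eq_false.mp hval c hc
      simpa using this
    have hsum : (List.map (fun r => ((List.count r combo : Nat) : Int)) pvRANK).sum
        = ((combo.length : Nat) : Int) := by
      rw [sum_counts pvRANK (by decide) combo, List.filter_eq_self.mpr hvalid]
    rw [hsum, bne_self_eq_false, if_neg (show ¬ (false = true) from by simp)]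
    -- A's dict is the counter
    simp only [stepA_eq, PySem.Dict.foldl_insert_getD_add_one_eq_counter, PySem.Dict.keys_counter]
    rw [foldl_split (PySem.Dict.counter combo) (PySem.Set.ofList combo) [] []]
    simp only [List.nil_append, PySem.Dict.getD_counter]
    -- B's scan characterised
    have hpos : ∀ p ∈ (PySem.List.enumerate pvRANK 0).map
        (fun p => (p.1, ((List.count p.2 combo : Nat) : Int))), (0 : Int) ≤ p.1 := by
      intro p hp
      obtain ⟨q, hq, rfl⟩ := List.mem_map.mp hp
      exact enum_nonneg pvRANK q hq
    rw [enum_map, scan_char _ 0 0 (-1) (-1) hpos]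
    rw [List.all_map, List.filter_map, List.filter_map]
    simp only [List.map_map, Function.comp_def, zero_add, List.length_map]
    rw [if_pos (by norm_num : (-1 : Int) < 0)]
    have h12 : PySem.List.pyGet? (List.map (fun r => ((List.count r combo : Nat) : Int)) pvRANK) 12
        = some ((List.count "2" combo : Nat) : Int) := by
      rw [show (12 : Int) = ((12 : Nat) : Int) from rfl, PySem.List.pyGet?_natCast]
      simp [pvRANK]
    have h13 : PySem.List.pyGet? (List.map (fun r => ((List.count r combo : Nat) : Int)) pvRANK) 13
        = some ((List.count "B" combo : Nat) : Int) := by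
      rw [show (13 : Int) = ((13 : Nat) : Int) from rfl, PySem.List.pyGet?_natCast]
      simp [pvRANK]
    have h14 : PySem.List.pyGet? (List.map (fun r => ((List.count r combo : Nat) : Int)) pvRANK) 14
        = some ((List.count "R" combo : Nat) : Int) := by
      rw [show (14 : Int) = ((14 : Nat) : Int) from rfl, PySem.List.pyGet?_natCast]
      simp [pvRANK]
    rw [h12, h13, h14]
    by_cases hbad : (combo.any fun card =>
        ((List.count card combo : Nat) : Int) != 3 && ((List.count card combo : Nat) : Int) != 1) = true
    · -- a count that is neither 3 nor 1: A's second loop fails, B's scan hits the bad slot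
      rw [if_pos hbad]
      obtain ⟨card, hcard, hbv⟩ := List.any_eq_true.mp hbad
      have hallf : ((PySem.List.enumerate pvRANK 0).all
          (fun p => ((List.count p.2 combo : Nat) : Int) == 3 ||
            ((List.count p.2 combo : Nat) : Int) == 1 ||
            ((List.count p.2 combo : Nat) : Int) == 0)) = false := by
        apply List.all_eq_false.mpr
        have hcm : card ∈ pvRANK := by
          have := hvalid card hcard
          simpa using this
        have : card ∈ (PySem.List.enumerate pvRANK 0).map (fun p => p.2) := by
          rw [PySem.List.map_snd_enumerate]; exact hcm
        obtain ⟨p, hp, hpe⟩ := List.mem_map.mp this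
        refine ⟨p, hp, ?_⟩
        rw [hpe]
        have hcp : 0 < List.count card combo := List.count_pos_iff.mpr hcard
        simp only [bne_iff_ne, ne_eq, Bool.and_eq_true] at hbv
        simp only [Bool.or_eq_true, beq_iff_eq, not_or]
        omega
      rw [hallf, if_neg (show ¬ (false = true) from by simp)]
    · rw [if_neg hbad]
      rw [Bool.not_eq_true] at hbad
      have hgood : ((PySem.List.enumerate pvRANK 0).all
          (fun p => ((List.count p.2 combo : Nat) : Int) == 3 ||
            ((List.count p.2 combo : Nat) : Int) == 1 ||
            ((List.count p.2 combo : Nat) : Int) == 0)) = true := by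
        apply List.all_eq_true.mpr
        intro p hp
        by_cases hm : p.2 ∈ combo
        · have := List.any_eq_false.mp hbad p.2 hm
          simp only [bne_iff_ne, ne_eq, Bool.and_eq_true, not_and, not_not] at this
          simp only [Bool.or_eq_true, beq_iff_eq]
          by_cases h3 : ((List.count p.2 combo : Nat) : Int) = 3
          · exact Or.inl (Or.inl h3)
          · exact Or.inl (Or.inr (this h3))
        · have h0 : List.count p.2 combo = 0 := List.count_eq_zero.mpr hm
          simp [h0]
      rw [hgood, if_pos rfl]
      -- membership / length bridges between A's rank lists and B's table slices
      have hmem3 : ∀ r : String, ((List.count r combo : Int) == 3) = true → r ∈ combo := by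
        intro r h
        rw [beq_iff_eq] at h
        have : List.count r combo = 3 := by exact_mod_cast h
        exact List.count_pos_iff.mp (by omega)
      have hmem1 : ∀ r : String, ((List.count r combo : Int) == 1) = true → r ∈ combo := by
        intro r h
        rw [beq_iff_eq] at h
        have : List.count r combo = 1 := by exact_mod_cast h
        exact List.count_pos_iff.mp (by omega)
      have hTmem : ∀ r : String,
          r ∈ List.filter (fun r => ((List.count r combo : Int) == 3)) (PySem.Set.ofList combo)
            ↔ ((List.count r combo : Int) == 3) = true := by
        intro r
        rw [List.mem_filter, PySem.Set.mem_ofList]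
        exact ⟨And.right, fun h => ⟨hmem3 r h, h⟩⟩
      have hSmem : ∀ r : String,
          r ∈ List.filter (fun r => ((List.count r combo : Int) == 1)) (PySem.Set.ofList combo)
            ↔ ((List.count r combo : Int) == 1) = true := by
        intro r
        rw [List.mem_filter, PySem.Set.mem_ofList]
        exact ⟨And.right, fun h => ⟨hmem1 r h, h⟩⟩
      have hRF : List.filter (fun r => ((List.count r combo : Int) == 3)) pvRANK
          = List.map (fun x => x.2)
              (List.filter (fun p => ((List.count p.2 combo : Int) == 3)) (PySem.List.enumerate pvRANK 0)) := by
        conv_lhs => rw [← PySem.List.map_snd_enumerate pvRANK 0]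
        rw [List.filter_map]
        rfl
      have hRF1 : List.filter (fun r => ((List.count r combo : Int) == 1)) pvRANK
          = List.map (fun x => x.2)
              (List.filter (fun p => ((List.count p.2 combo : Int) == 1)) (PySem.List.enumerate pvRANK 0)) := by
        conv_lhs => rw [← PySem.List.map_snd_enumerate pvRANK 0]
        rw [List.filter_map]
        rfl
      have hTlen : (List.filter (fun r => ((List.count r combo : Int) == 3)) (PySem.Set.ofList combo)).length
          = (List.filter (fun p => ((List.count p.2 combo : Int) == 3)) (PySem.List.enumerate pvRANK 0)).length := by
        have hperm : (List.filter (fun r => ((List.count r combo : Int) == 3)) (PySem.Set.ofList combo)).Perm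
            (List.filter (fun r => ((List.count r combo : Int) == 3)) pvRANK) := by
          rw [List.perm_ext_iff_of_nodup ((PySem.Set.nodup_ofList combo).filter _)
            ((by decide : pvRANK.Nodup).filter _)]
          intro r
          rw [hTmem, List.mem_filter]
          constructor
          · intro h
            refine ⟨?_, h⟩
            exact List.contains_iff_mem.mp (hvalid r (hmem3 r h))
          · exact And.right
        rw [hperm.length_eq, hRF, List.length_map]
      have hSlen : (List.filter (fun r => ((List.count r combo : Int) == 1)) (PySem.Set.ofList combo)).length
          = (List.filter (fun p => ((List.count p.2 combo : Int) == 1)) (PySem.List.enumerate pvRANK 0)).length := by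
        have hperm : (List.filter (fun r => ((List.count r combo : Int) == 1)) (PySem.Set.ofList combo)).Perm
            (List.filter (fun r => ((List.count r combo : Int) == 1)) pvRANK) := by
          rw [List.perm_ext_iff_of_nodup ((PySem.Set.nodup_ofList combo).filter _)
            ((by decide : pvRANK.Nodup).filter _)]
          intro r
          rw [hSmem, List.mem_filter]
          constructor
          · intro h
            refine ⟨?_, h⟩
            exact List.contains_iff_mem.mp (hvalid r (hmem1 r h))
          · exact And.right
        rw [hperm.length_eq, hRF1, List.length_map]
      have hg3 : (List.filter (fun r => ((List.count r combo : Int) == 3)) (PySem.Set.ofList combo)).contains "2"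
          = ((List.count "2" combo : Int) == 3) := by
        rw [Bool.eq_iff_iff, List.contains_iff_mem, hTmem]
      have hgB : (List.filter (fun r => ((List.count r combo : Int) == 1)) (PySem.Set.ofList combo)).contains "B"
          = ((List.count "B" combo : Int) == 1) := by
        rw [Bool.eq_iff_iff, List.contains_iff_mem, hSmem]
      have hgR : (List.filter (fun r => ((List.count r combo : Int) == 1)) (PySem.Set.ofList combo)).contains "R"
          = ((List.count "R" combo : Int) == 1) := by
        rw [Bool.eq_iff_iff, List.contains_iff_mem, hSmem]
      have hsorted : pvSortedCards (List.filter (fun r => ((List.count r combo : Int) == 3)) (PySem.Set.ofList combo))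
          = some (List.filter (fun r => ((List.count r combo : Int) == 3)) pvRANK) := by
        rw [sortedCards_eq _ ((PySem.Set.nodup_ofList combo).filter _)
          (List.all_eq_true.mpr (fun r hr => hvalid r (hmem3 r ((hTmem r).mp hr))))]
        congr 1
        apply List.filter_congr
        intro r _
        rw [Bool.eq_iff_iff, List.contains_iff_mem, hTmem]
      rw [hTlen, hSlen, hg3, hgB, hgR, hsorted]
      set F3 := List.filter (fun p => ((List.count p.2 combo : Int) == 3)) (PySem.List.enumerate pvRANK 0) with hF3def
      set S1 := List.filter (fun p => ((List.count p.2 combo : Int) == 1)) (PySem.List.enumerate pvRANK 0) with hS1def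
      by_cases hlen : F3.length = S1.length
      · rw [if_neg (by simp [hlen])]
        by_cases h2t : ((List.count "2" combo : Int) == 3) = true
        · rw [if_pos h2t]
          symm
          have h2 : List.count "2" combo = 3 := by
            rw [beq_iff_eq] at h2t
            exact_mod_cast h2t
          simp [h2]
        · rw [if_neg h2t]
          by_cases hBR : (((List.count "B" combo : Int) == 1) && ((List.count "R" combo : Int) == 1)) = true
          · rw [if_pos hBR]
            symm
            simp only [Bool.and_eq_true] at hBR
            simp [hBR.1, hBR.2]
          · rw [if_neg hBR]
            by_cases hlt2 : F3.length < 2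
            · rw [if_pos hlt2]
              have h2f : ¬ (2 ≤ (F3.length : Int)) := by exact_mod_cast Nat.not_le.mpr hlt2
              symm
              simp [h2f]
            · rw [if_neg hlt2]
              have hne : F3 ≠ [] := by
                intro h0
                rw [h0] at hlt2
                simp at hlt2
              have hA := final_eq (fun r => ((List.count r combo : Int) == 3)) hne
              rw [← hF3def] at hA
              simp only [hA]
              rcases hm : F3.map (fun x => x.1) with _ | ⟨a, t⟩
              · exact absurd (List.map_eq_nil_iff.mp hm) hne
              · rw [hm, PySem.List.pyGet?_neg_one, PySem.List.pyGet?_zero]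
                have hcast : ((F3.length : Nat) : Int) = (((a :: t).length : Nat) : Int) := by
                  rw [← hm, List.length_map]
                rw [List.getLast?_eq_some_getLast (List.cons_ne_nil a t),
                  List.getElem?_eq_getElem (show 0 < (a :: t).length by simp)]
                have hge2 : (2 : Int) ≤ (F3.length : Int) := by exact_mod_cast Nat.le_of_not_lt hlt2
                rw [Bool.not_eq_true] at h2t hBR
                have hb1 : ((F3.length : Int) == (S1.length : Int)) = true := by
                  rw [hlen]; simp
                have hb2 : decide (2 ≤ (F3.length : Int)) = true := by simpa using hge2
                have hb3 : (((List.count "2" combo : Nat) : Int) != 3) = true := by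
                  simp [bne, h2t]
                have hb4 : (!(((List.count "B" combo : Nat) : Int) == 1 &&
                    ((List.count "R" combo : Nat) : Int) == 1)) = true := by
                  simp [hBR]
                rw [hb1, hb2, hb3, hb4]
                simp only [Bool.true_and]
                rw [List.getLastD_eq_getLast?, List.getLast?_eq_some_getLast (List.cons_ne_nil a t)]
                simp [hcast]
      · rw [if_pos (by simpa using hlen)]
        symm
        simp [hlen]
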